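-- pv_equiv track=rewrite | github.com/randomizedid/LeetCodeProblems | leetcodes.py | CountSpecialQuadruplets
-- ===== SOURCE A (Python) =====
-- def CountSpecialQuadruplets(nums):
--     count = 0
--     for i in range(len(nums)-3):
--         for j in range(i+1, len(nums)-2):
--             for k in range (j+1, len(nums)-1):
--                 sum = nums[i] + nums[j] + nums[k]
--                 count += nums[k+1:].count(sum)
--     return count
-- ===== SOURCE B (Python) =====
-- def CountSpecialQuadruplets(nums):
--     n = len(nums)
--     total = 0
--     pair_sums = {}
--     for k in range(2, n - 1):
--         j = k - 1
--         for i in range(j):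
--             s = nums[i] + nums[j]
--             pair_sums[s] = pair_sums.get(s, 0) + 1
--         for l in range(k + 1, n):
--             total += pair_sums.get(nums[l] - nums[k], 0)
--     return total
-- ===== Notes on version B (the rewrite author's own statement) =====
-- stated objective: faster
-- what changed: A enumerates all index triples (i,j,k) and scans the tail for each with list.count (O(n^4)); B makes one left-to-right sweep over k, maintaining a hash map counting how many pairs (i,j) with i<j<k give each pair sum, and for each l>k adds the count of nums[l]-nums[k], i.e. O(n^2).
import Mathlib
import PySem

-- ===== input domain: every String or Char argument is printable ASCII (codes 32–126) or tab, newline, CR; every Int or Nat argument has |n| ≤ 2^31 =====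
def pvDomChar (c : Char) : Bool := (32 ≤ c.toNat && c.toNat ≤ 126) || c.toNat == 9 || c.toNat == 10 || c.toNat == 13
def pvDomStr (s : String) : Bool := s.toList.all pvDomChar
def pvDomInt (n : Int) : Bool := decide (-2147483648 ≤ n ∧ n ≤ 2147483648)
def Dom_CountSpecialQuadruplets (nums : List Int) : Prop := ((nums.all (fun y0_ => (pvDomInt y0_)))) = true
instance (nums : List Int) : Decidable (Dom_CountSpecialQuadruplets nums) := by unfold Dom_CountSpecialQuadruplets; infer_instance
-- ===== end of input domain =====

-- B replaces A's brute-force scan over all (i,j,k) plus a list count with a single left-to-right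
-- sweep maintaining a dict of pair sums (O(n^2) instead of O(n^3)·scan); same return value.

-- ===== PORT A =====
def CountSpecialQuadruplets (nums : List Int) : Int :=
  (PySem.List.pyRange 0 (PySem.List.len nums - 3)).foldl (fun count i =>
    (PySem.List.pyRange (i + 1) (PySem.List.len nums - 2)).foldl (fun count j =>
      (PySem.List.pyRange (j + 1) (PySem.List.len nums - 1)).foldl (fun count k =>
        count + ((PySem.List.slice nums (some (k + 1)) none).count
          (PySem.List.pyGetD nums i 0 + PySem.List.pyGetD nums j 0 + PySem.List.pyGetD nums k 0) : Int))
        count) count) 0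

-- ===== PORT B =====
def CountSpecialQuadruplets_alt (nums : List Int) : Int :=
  ((PySem.List.pyRange 2 (PySem.List.len nums - 1)).foldl
    (fun (st : PySem.Dict Int Int × Int) k =>
      let j := k - 1
      let d := (PySem.List.pyRange 0 j).foldl (fun d i =>
          let s := PySem.List.pyGetD nums i 0 + PySem.List.pyGetD nums j 0
          d.insert s (d.getD s 0 + 1)) st.1
      let t := (PySem.List.pyRange (k + 1) (PySem.List.len nums)).foldl (fun t l =>
          t + d.getD (PySem.List.pyGetD nums l 0 - PySem.List.pyGetD nums k 0) 0) st.2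
      (d, t))
    (PySem.Dict.empty, 0)).2

-- ===== PRECONDITION & SPEC =====
def Spec_CountSpecialQuadruplets (nums : List Int) (out : Int) : Prop := out = CountSpecialQuadruplets_alt nums
instance (nums : List Int) (out : Int) : Decidable (Spec_CountSpecialQuadruplets nums out) := by unfold Spec_CountSpecialQuadruplets; infer_instance

-- ===== CLAIM (what is proved, stated in full; the proofs are below) =====
def Claim_equal_CountSpecialQuadruplets : Prop := ∀ (nums : List Int), Dom_CountSpecialQuadruplets nums → Spec_CountSpecialQuadruplets nums (CountSpecialQuadruplets nums)

-- ===== LEMMAS AND PROOFS =====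

lemma pyRange_nil {a b : Int} (h : b ≤ a) : PySem.List.pyRange a b = [] := by
  rw [List.eq_nil_iff_forall_not_mem]
  intro x hx
  rw [PySem.List.mem_pyRange_one] at hx
  omega

lemma sum_map_pyRange (c : Nat → Int) (A B : Nat) :
    ((PySem.List.pyRange (A : Int) (B : Int)).map (fun x => c x.toNat)).sum
      = ∑ x ∈ Finset.Ico A B, c x := by
  induction B with
  | zero =>
    rw [pyRange_nil (by exact_mod_cast Int.natCast_nonneg A)]
    simp
  | succ B ih =>
    by_cases hAB : A ≤ B
    · rw [show ((B + 1 : Nat) : Int) = (B : Int) + 1 by push_cast; ring,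
        PySem.List.pyRange_one_succ_right (by exact_mod_cast hAB)]
      simp only [List.map_append, List.sum_append, List.map_cons, List.map_nil, List.sum_cons,
        List.sum_nil, Int.toNat_natCast]
      rw [ih, Finset.sum_Ico_succ_top hAB]
      ring
    · rw [pyRange_nil (by exact_mod_cast by omega), Finset.Ico_eq_empty (by omega)]
      simp

lemma count_int_eq_sum (v : Int) (xs : List Int) :
    (xs.count v : Int) = ∑ t ∈ Finset.range xs.length, ite (xs.getD t 0 = v) 1 0 := by
  induction xs with
  | nil => simp
  | cons x l ih =>
    rw [List.length_cons, Finset.sum_range_succ']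
    simp only [List.getD_cons_succ, List.getD_cons_zero, List.count_cons]
    rw [← ih]
    by_cases hx : x = v
    · simp [hx]
    · simp [hx, beq_iff_eq]

def aIx (nums : List Int) (t : Nat) : Int := nums.getD t 0

lemma count_drop (nums : List Int) (v : Int) (m : Nat) :
    (((List.drop m nums).count v : Int))
      = ∑ l ∈ Finset.Ico m nums.length, ite (aIx nums l = v) 1 0 := by
  simp only [aIx]
  rw [count_int_eq_sum, List.length_drop, Finset.sum_Ico_eq_sum_range]
  apply Finset.sum_congr rfl
  intro t ht
  have : (List.drop m nums).getD t 0 = nums.getD (m + t) 0 := by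
    rw [List.getD_eq_getElem?_getD, List.getD_eq_getElem?_getD, List.getElem?_drop]
  rw [this]
  rfl

lemma count_map_range (f : Nat → Int) (v : Int) (j : Nat) :
    ((((List.range j).map f).count v : Int)) = ∑ i ∈ Finset.range j, ite (f i = v) 1 0 := by
  induction j with
  | zero => simp
  | succ j ih =>
    rw [List.range_succ, List.map_append, List.count_append, Finset.sum_range_succ]
    push_cast
    rw [ih]
    by_cases hf : f j = v
    · simp [hf]
    · simp [hf]

lemma dict_count_fold (d : PySem.Dict Int Int) (L : List Int) (v : Int) :
    (L.foldl (fun d s => d.insert s (d.getD s 0 + 1)) d).getD v 0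
      = d.getD v 0 + (L.count v : Int) :=
  PySem.Dict.getD_foldl_modify_add_one L d v

lemma Ico_sum_to_range {n a b : Nat} (h : b ≤ n) (f : Nat → Int) :
    ∑ x ∈ Finset.Ico a b, f x = ∑ x ∈ Finset.range n, ite (a ≤ x ∧ x < b) (f x) 0 := by
  rw [← Finset.sum_filter]
  apply Finset.sum_congr _ (fun _ _ => rfl)
  ext x
  simp only [Finset.mem_Ico, Finset.mem_filter, Finset.mem_range]
  omega

def pairSums (nums : List Int) (m : Nat) : List Int :=
  (List.range m).flatMap (fun j => (List.range j).map (fun i => aIx nums i + aIx nums j))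

lemma range_sum_to_range {n b : Nat} (h : b ≤ n) (f : Nat → Int) :
    ∑ x ∈ Finset.range b, f x = ∑ x ∈ Finset.range n, ite (0 ≤ x ∧ x < b) (f x) 0 := by
  rw [← Finset.sum_filter]
  apply Finset.sum_congr _ (fun _ _ => rfl)
  ext x
  simp only [Finset.mem_filter, Finset.mem_range]
  omega

lemma sum4_comm (s : Finset Nat) (f : Nat → Nat → Nat → Nat → Int) :
    (∑ i ∈ s, ∑ j ∈ s, ∑ k ∈ s, ∑ l ∈ s, f i j k l)
      = ∑ k ∈ s, ∑ l ∈ s, ∑ j ∈ s, ∑ i ∈ s, f i j k l :=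
  calc (∑ i ∈ s, ∑ j ∈ s, ∑ k ∈ s, ∑ l ∈ s, f i j k l)
      = ∑ i ∈ s, ∑ k ∈ s, ∑ j ∈ s, ∑ l ∈ s, f i j k l :=
        Finset.sum_congr rfl (fun _ _ => Finset.sum_comm)
    _ = ∑ k ∈ s, ∑ i ∈ s, ∑ j ∈ s, ∑ l ∈ s, f i j k l := Finset.sum_comm
    _ = ∑ k ∈ s, ∑ i ∈ s, ∑ l ∈ s, ∑ j ∈ s, f i j k l :=
        Finset.sum_congr rfl (fun _ _ => Finset.sum_congr rfl (fun _ _ => Finset.sum_comm))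
    _ = ∑ k ∈ s, ∑ l ∈ s, ∑ i ∈ s, ∑ j ∈ s, f i j k l :=
        Finset.sum_congr rfl (fun _ _ => Finset.sum_comm)
    _ = ∑ k ∈ s, ∑ l ∈ s, ∑ j ∈ s, ∑ i ∈ s, f i j k l :=
        Finset.sum_congr rfl (fun _ _ => Finset.sum_congr rfl (fun _ _ => Finset.sum_comm))

lemma pairSums_succ (nums : List Int) (k : Nat) :
    pairSums nums (k + 1) = pairSums nums k ++ (List.range k).map (fun i => aIx nums i + aIx nums k) := by
  unfold pairSums
  rw [List.range_succ, List.flatMap_append]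
  simp

lemma count_pairSums (nums : List Int) (v : Int) (k : Nat) :
    (((pairSums nums k).count v : Int))
      = ∑ j ∈ Finset.range k, ∑ i ∈ Finset.range j, ite (aIx nums i + aIx nums j = v) 1 0 := by
  induction k with
  | zero => simp [pairSums]
  | succ k ih =>
    rw [pairSums_succ, List.count_append, Finset.sum_range_succ]
    push_cast
    rw [ih, count_map_range]

def bTotal (nums : List Int) (M : Nat) : Int :=
  ∑ k ∈ Finset.Ico 2 M, ∑ l ∈ Finset.Ico (k + 1) nums.length,
    ((pairSums nums k).count (aIx nums l - aIx nums k) : Int)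

def stepB (nums : List Int) (st : PySem.Dict Int Int × Int) (k : Int) : PySem.Dict Int Int × Int :=
  let j := k - 1
  let d := (PySem.List.pyRange 0 j).foldl (fun d i =>
      let s := PySem.List.pyGetD nums i 0 + PySem.List.pyGetD nums j 0
      d.insert s (d.getD s 0 + 1)) st.1
  let t := (PySem.List.pyRange (k + 1) (PySem.List.len nums)).foldl (fun t l =>
      t + d.getD (PySem.List.pyGetD nums l 0 - PySem.List.pyGetD nums k 0) 0) st.2
  (d, t)

lemma stepB_spec (nums : List Int) (M : Nat) (hM : 2 ≤ M) (st : PySem.Dict Int Int × Int)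
    (hd : ∀ v, st.1.getD v 0 = ((pairSums nums (M - 1)).count v : Int)) :
    (∀ v, (stepB nums st (M : Int)).1.getD v 0 = ((pairSums nums M).count v : Int))
    ∧ (stepB nums st (M : Int)).2
        = st.2 + ∑ l ∈ Finset.Ico (M + 1) nums.length,
            ((pairSums nums M).count (aIx nums l - aIx nums M) : Int) := by
  have hM1 : ((M : Int) - 1) = ((M - 1 : Nat) : Int) := by omega
  have hdict : ∀ v, (stepB nums st (M : Int)).1.getD v 0 = ((pairSums nums M).count v : Int) := by
    intro v
    show ((PySem.List.pyRange 0 ((M : Int) - 1)).foldl (fun d i =>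
        let s := PySem.List.pyGetD nums i 0 + PySem.List.pyGetD nums ((M : Int) - 1) 0
        d.insert s (d.getD s 0 + 1)) st.1).getD v 0 = _
    rw [hM1, PySem.List.pyRange_zero_natCast, List.foldl_map]
    simp only [PySem.List.pyGetD_natCast]
    rw [show (fun (d : PySem.Dict Int Int) (i : Nat) =>
        let s := nums.getD i 0 + nums.getD (M - 1) 0
        d.insert s (d.getD s 0 + 1))
      = (fun d i => (fun (d : PySem.Dict Int Int) (s : Int) => d.insert s (d.getD s 0 + 1)) d
          ((fun i => aIx nums i + aIx nums (M - 1)) i)) from rfl,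
      ← List.foldl_map (f := fun i => aIx nums i + aIx nums (M - 1))
        (g := fun (d : PySem.Dict Int Int) (s : Int) => d.insert s (d.getD s 0 + 1)),
      dict_count_fold, hd v]
    have : pairSums nums M = pairSums nums (M - 1)
        ++ (List.range (M - 1)).map (fun i => aIx nums i + aIx nums (M - 1)) := by
      rw [← pairSums_succ]
      congr 1
      omega
    rw [this, List.count_append]
    push_cast
    ring
  refine ⟨hdict, ?_⟩
  show ((PySem.List.pyRange ((M : Int) + 1) (PySem.List.len nums)).foldl (fun t l =>
      t + (stepB nums st (M : Int)).1.getD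
        (PySem.List.pyGetD nums l 0 - PySem.List.pyGetD nums (M : Int) 0) 0) st.2) = _
  rw [PySem.List.foldl_congr_mem _ _
      (fun t (l : Int) => t + ((pairSums nums M).count (aIx nums l.toNat - aIx nums M) : Int)) _ ?hcongr]
  case hcongr =>
    intro acc x hx
    rw [PySem.List.mem_pyRange_one] at hx
    have hx0 : 0 ≤ x := by omega
    rw [PySem.List.pyGetD_of_nonneg _ _ hx0, PySem.List.pyGetD_natCast, hdict]
    rfl
  rw [PySem.List.foldl_add]
  congr 1
  rw [show ((M : Int) + 1) = ((M + 1 : Nat) : Int) by push_cast; ring,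
    show PySem.List.len nums = ((nums.length : Nat) : Int) from rfl,
    sum_map_pyRange (fun l => ((pairSums nums M).count (aIx nums l - aIx nums M) : Int))]

lemma bfold_inv (nums : List Int) (M : Nat) :
    ((PySem.List.pyRange 2 (M : Int)).foldl (stepB nums) (PySem.Dict.empty, 0)).2
        = bTotal nums M
    ∧ ∀ v, ((PySem.List.pyRange 2 (M : Int)).foldl (stepB nums) (PySem.Dict.empty, 0)).1.getD v 0
        = ((pairSums nums (M - 1)).count v : Int) := by
  induction M with
  | zero =>
    rw [pyRange_nil (by omega)]
    refine ⟨by simp [bTotal], fun v => ?_⟩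
    simp [pairSums, PySem.Dict.empty, PySem.Dict.getD, PySem.Dict.get?]
  | succ M ih =>
    by_cases h2 : 2 ≤ M
    · obtain ⟨ht, hd⟩ := ih
      rw [show ((M + 1 : Nat) : Int) = (M : Int) + 1 by push_cast; ring,
        PySem.List.pyRange_one_succ_right (by exact_mod_cast h2), List.foldl_append,
        List.foldl_cons, List.foldl_nil]
      obtain ⟨hd', ht'⟩ := stepB_spec nums M h2 _ hd
      refine ⟨?_, fun v => by rw [hd' v]; norm_num⟩
      rw [ht', ht]
      unfold bTotal
      rw [Finset.sum_Ico_succ_top h2]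
    · rw [pyRange_nil (by omega)]
      constructor
      · simp [bTotal, Finset.Ico_eq_empty (by omega : ¬ 2 < M + 1)]
      · intro v
        have hp : pairSums nums (M + 1 - 1) = [] := by
          interval_cases M <;> simp [pairSums, List.range_succ]
        rw [hp]
        simp [PySem.Dict.empty, PySem.Dict.getD, PySem.Dict.get?]

lemma alt_eq_bTotal (nums : List Int) :
    CountSpecialQuadruplets_alt nums = bTotal nums (nums.length - 1) := by
  show ((PySem.List.pyRange 2 (PySem.List.len nums - 1)).foldl (stepB nums)
    (PySem.Dict.empty, 0)).2 = _
  by_cases h0 : nums.length = 0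
  · rw [show (PySem.List.len nums - 1) = (-1 : Int) by simp [PySem.List.len, h0],
      pyRange_nil (by omega)]
    simp [bTotal, h0]
  · rw [show (PySem.List.len nums - 1) = ((nums.length - 1 : Nat) : Int) by
      simp only [PySem.List.len]; omega]
    exact (bfold_inv nums (nums.length - 1)).1

-- count of nums[k+1:] matching nums[i]+nums[j]+nums[k], Nat indices
def cnt (nums : List Int) (i j k : Nat) : Int :=
  ((List.drop (k + 1) nums).count (aIx nums i + aIx nums j + aIx nums k) : Int)

lemma aLoopK (nums : List Int) (i j : Nat) (h3 : 3 ≤ nums.length) (acc : Int) :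
    (PySem.List.pyRange ((j : Int) + 1) (PySem.List.len nums - 1)).foldl
      (fun count k => count + ((PySem.List.slice nums (some (k + 1)) none).count
        (PySem.List.pyGetD nums (i : Int) 0 + PySem.List.pyGetD nums (j : Int) 0
          + PySem.List.pyGetD nums k 0) : Int)) acc
    = acc + ∑ k ∈ Finset.Ico (j + 1) (nums.length - 1), cnt nums i j k := by
  rw [PySem.List.foldl_add]
  congr 1
  rw [show ((j : Int) + 1) = ((j + 1 : Nat) : Int) by push_cast; ring,
    show (PySem.List.len nums - 1) = ((nums.length - 1 : Nat) : Int) by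
      simp only [PySem.List.len]; omega,
    ← sum_map_pyRange (fun k => cnt nums i j k)]
  apply congrArg List.sum
  apply List.map_congr_left
  intro k hk
  rw [PySem.List.mem_pyRange_one] at hk
  have hk0 : 0 ≤ k := by omega
  rw [PySem.List.slice_from nums (by omega), PySem.List.pyGetD_natCast,
    PySem.List.pyGetD_natCast, PySem.List.pyGetD_of_nonneg nums _ hk0,
    show (k + 1).toNat = k.toNat + 1 by omega]
  rfl

lemma aLoopJ (nums : List Int) (i : Nat) (h3 : 3 ≤ nums.length) (acc : Int) :
    (PySem.List.pyRange ((i : Int) + 1) (PySem.List.len nums - 2)).foldl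
      (fun count j =>
        (PySem.List.pyRange (j + 1) (PySem.List.len nums - 1)).foldl
          (fun count k => count + ((PySem.List.slice nums (some (k + 1)) none).count
            (PySem.List.pyGetD nums (i : Int) 0 + PySem.List.pyGetD nums j 0
              + PySem.List.pyGetD nums k 0) : Int)) count) acc
    = acc + ∑ j ∈ Finset.Ico (i + 1) (nums.length - 2),
        ∑ k ∈ Finset.Ico (j + 1) (nums.length - 1), cnt nums i j k := by
  rw [PySem.List.foldl_congr_mem _ _
    (fun acc (j : Int) => acc + ∑ k ∈ Finset.Ico (j.toNat + 1) (nums.length - 1), cnt nums i j.toNat k)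
    _ ?hc]
  case hc =>
    intro acc j hj
    rw [PySem.List.mem_pyRange_one] at hj
    have hj' : j = ((j.toNat : Nat) : Int) := by omega
    rw [hj']
    exact aLoopK nums i j.toNat h3 acc
  rw [PySem.List.foldl_add]
  congr 1
  rw [show ((i : Int) + 1) = ((i + 1 : Nat) : Int) by push_cast; ring,
    show (PySem.List.len nums - 2) = ((nums.length - 2 : Nat) : Int) by
      simp only [PySem.List.len]; omega,
    ← sum_map_pyRange (fun j => ∑ k ∈ Finset.Ico (j + 1) (nums.length - 1), cnt nums i j k)]

lemma a_eq_sum (nums : List Int) (h3 : 3 ≤ nums.length) :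
    CountSpecialQuadruplets nums
      = ∑ i ∈ Finset.Ico 0 (nums.length - 3), ∑ j ∈ Finset.Ico (i + 1) (nums.length - 2),
          ∑ k ∈ Finset.Ico (j + 1) (nums.length - 1), cnt nums i j k := by
  unfold CountSpecialQuadruplets
  rw [PySem.List.foldl_congr_mem _ _
    (fun acc (i : Int) => acc + ∑ j ∈ Finset.Ico (i.toNat + 1) (nums.length - 2),
      ∑ k ∈ Finset.Ico (j + 1) (nums.length - 1), cnt nums i.toNat j k)
    _ ?hc]
  case hc =>
    intro acc i hi
    rw [PySem.List.mem_pyRange_one] at hi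
    have hi' : i = ((i.toNat : Nat) : Int) := by omega
    rw [hi']
    exact aLoopJ nums i.toNat h3 acc
  rw [PySem.List.foldl_add]
  rw [show (0 : Int) = ((0 : Nat) : Int) by norm_num,
    show (PySem.List.len nums - 3) = ((nums.length - 3 : Nat) : Int) by
      simp only [PySem.List.len]; omega,
    ← sum_map_pyRange (fun i => ∑ j ∈ Finset.Ico (i + 1) (nums.length - 2),
      ∑ k ∈ Finset.Ico (j + 1) (nums.length - 1), cnt nums i j k)]
  norm_num

lemma ite_sum_push (C : Prop) [Decidable C] (s : Finset Nat) (f : Nat → Int) :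
    ite C (∑ x ∈ s, f x) 0 = ∑ x ∈ s, ite C (f x) 0 := by
  by_cases h : C <;> simp [h]

lemma ite_ite_and (C D : Prop) [Decidable C] [Decidable D] (x : Int) :
    ite C (ite D x 0) 0 = ite (C ∧ D) x 0 := by
  by_cases hC : C <;> by_cases hD : D <;> simp [hC, hD]

lemma main_sum (nums : List Int) (h3 : 3 ≤ nums.length) :
    ∑ i ∈ Finset.Ico 0 (nums.length - 3), ∑ j ∈ Finset.Ico (i + 1) (nums.length - 2),
      ∑ k ∈ Finset.Ico (j + 1) (nums.length - 1), cnt nums i j k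
    = bTotal nums (nums.length - 1) := by
  -- A side flattened over range n
  have hA : ∑ i ∈ Finset.Ico 0 (nums.length - 3), ∑ j ∈ Finset.Ico (i + 1) (nums.length - 2),
      ∑ k ∈ Finset.Ico (j + 1) (nums.length - 1), cnt nums i j k
    = ∑ i ∈ Finset.range nums.length, ∑ j ∈ Finset.range nums.length,
      ∑ k ∈ Finset.range nums.length, ∑ l ∈ Finset.range nums.length,
        ite ((0 ≤ i ∧ i < nums.length - 3) ∧ (i + 1 ≤ j ∧ j < nums.length - 2)
          ∧ (j + 1 ≤ k ∧ k < nums.length - 1) ∧ (k + 1 ≤ l ∧ l < nums.length)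
          ∧ aIx nums l = aIx nums i + aIx nums j + aIx nums k) (1 : Int) 0 := by
    rw [Ico_sum_to_range (n := nums.length) (by omega)]
    apply Finset.sum_congr rfl
    intro i _
    rw [show (∑ j ∈ Finset.Ico (i + 1) (nums.length - 2),
        ∑ k ∈ Finset.Ico (j + 1) (nums.length - 1), cnt nums i j k)
      = ∑ j ∈ Finset.range nums.length, ite (i + 1 ≤ j ∧ j < nums.length - 2)
          (∑ k ∈ Finset.Ico (j + 1) (nums.length - 1), cnt nums i j k) 0 from
      Ico_sum_to_range (by omega) _]
    rw [Finset.sum_congr rfl (fun j (_ : j ∈ Finset.range nums.length) => if_congr Iff.rfl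
      (Ico_sum_to_range (n := nums.length) (by omega) (fun k => cnt nums i j k)) rfl)]
    rw [Finset.sum_congr rfl (fun j (_ : j ∈ Finset.range nums.length) => if_congr Iff.rfl
      (Finset.sum_congr rfl (fun k (_ : k ∈ Finset.range nums.length) => if_congr Iff.rfl
        (show cnt nums i j k = _ from by
          rw [cnt, count_drop, Ico_sum_to_range (n := nums.length) (by omega)
            (fun l => ite (aIx nums l = aIx nums i + aIx nums j + aIx nums k) (1 : Int) 0)]) rfl)) rfl)]
    simp only [ite_sum_push]
    apply Finset.sum_congr rfl; intro j _
    apply Finset.sum_congr rfl; intro k _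
    apply Finset.sum_congr rfl; intro l _
    simp only [ite_ite_and]
  -- B side flattened over range n, loop order k, l, j, i
  have hcount : ∀ k l : Nat, k < nums.length →
      ((pairSums nums k).count (aIx nums l - aIx nums k) : Int)
    = ∑ j ∈ Finset.range nums.length, ite (0 ≤ j ∧ j < k)
        (∑ i ∈ Finset.range nums.length, ite (0 ≤ i ∧ i < j)
          (ite (aIx nums i + aIx nums j = aIx nums l - aIx nums k) (1 : Int) 0) 0) 0 := by
    intro k l hk
    rw [count_pairSums, range_sum_to_range (n := nums.length) (by omega)]
    apply Finset.sum_congr rfl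
    intro j hj
    rw [Finset.mem_range] at hj
    apply if_congr Iff.rfl _ rfl
    rw [range_sum_to_range (n := nums.length) (by omega)]
  have hB : bTotal nums (nums.length - 1)
    = ∑ k ∈ Finset.range nums.length, ∑ l ∈ Finset.range nums.length,
      ∑ j ∈ Finset.range nums.length, ∑ i ∈ Finset.range nums.length,
        ite ((2 ≤ k ∧ k < nums.length - 1) ∧ (k + 1 ≤ l ∧ l < nums.length)
          ∧ (0 ≤ j ∧ j < k) ∧ (0 ≤ i ∧ i < j)
          ∧ aIx nums i + aIx nums j = aIx nums l - aIx nums k) (1 : Int) 0 := by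
    rw [bTotal, Ico_sum_to_range (n := nums.length) (by omega)]
    apply Finset.sum_congr rfl
    intro k hk
    rw [Finset.mem_range] at hk
    rw [show (∑ l ∈ Finset.Ico (k + 1) nums.length,
        ((pairSums nums k).count (aIx nums l - aIx nums k) : Int))
      = ∑ l ∈ Finset.range nums.length, ite (k + 1 ≤ l ∧ l < nums.length)
          ((pairSums nums k).count (aIx nums l - aIx nums k) : Int) 0 from
      Ico_sum_to_range (by omega) _]
    rw [Finset.sum_congr rfl (fun l (_ : l ∈ Finset.range nums.length) =>
      if_congr Iff.rfl (hcount k l hk) rfl)]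
    simp only [ite_sum_push]
    apply Finset.sum_congr rfl; intro l _
    apply Finset.sum_congr rfl; intro j _
    apply Finset.sum_congr rfl; intro i _
    simp only [ite_ite_and]
  rw [hA, hB,
    ← sum4_comm (Finset.range nums.length) (fun i j k l =>
      ite ((2 ≤ k ∧ k < nums.length - 1) ∧ (k + 1 ≤ l ∧ l < nums.length)
        ∧ (0 ≤ j ∧ j < k) ∧ (0 ≤ i ∧ i < j)
        ∧ aIx nums i + aIx nums j = aIx nums l - aIx nums k) (1 : Int) 0)]
  apply Finset.sum_congr rfl; intro i _
  apply Finset.sum_congr rfl; intro j _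
  apply Finset.sum_congr rfl; intro k _
  apply Finset.sum_congr rfl; intro l _
  apply if_congr _ rfl rfl
  constructor
  · rintro ⟨h1, h2, hk3, h4, h5⟩
    exact ⟨by omega, by omega, by omega, by omega, by omega⟩
  · rintro ⟨h1, h2, hk3, h4, h5⟩
    exact ⟨by omega, by omega, by omega, by omega, by omega⟩

-- ===== VERDICT (by name: the statement is the Claim_ definition above) =====
theorem CountSpecialQuadruplets_spec : Claim_equal_CountSpecialQuadruplets := by
  intro nums _
  unfold Spec_CountSpecialQuadruplets
  by_cases h3 : 3 ≤ nums.length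
  · rw [a_eq_sum nums h3, alt_eq_bTotal nums]
    exact main_sum nums h3
  · have hA : CountSpecialQuadruplets nums = 0 := by
      unfold CountSpecialQuadruplets
      rw [pyRange_nil (by simp only [PySem.List.len]; omega), List.foldl_nil]
    have hB : CountSpecialQuadruplets_alt nums = 0 := by
      rw [alt_eq_bTotal nums]
      unfold bTotal
      rw [Finset.Ico_eq_empty (by omega : ¬ 2 < nums.length - 1)]
      simp
    rw [hA, hB]
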